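-- pv_equiv track=rewrite | github.com/leopoldch/advent-of-code-2024 | day5.py | get_last_position
-- ===== SOURCE A (Python) =====
-- def get_last_position(number, tab, rules):
--     if number not in rules:
--         return len(tab) - 1
--     last_index = -1
--     for cur in tab:
--         if cur not in rules:
--             continue
--         if number in rules[cur]:
--             last_index = tab.index(cur)
--     return last_index
-- ===== SOURCE B (Python) =====
-- def get_last_position(number, tab, rules):
--     if number not in rules:
--         return len(tab) - 1
--     for cur in reversed(tab):
--         if cur in rules and number in rules[cur]:
--             return tab.index(cur)
--     return -1
-- ===== Notes on version B (the rewrite author's own statement) =====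
-- stated objective: simpler
-- what changed: Replaces the forward scan that keeps overwriting a last-match accumulator with a backward scan that returns at the first match (same tab.index first-occurrence resolution), dropping the accumulator entirely.
import Mathlib
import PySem

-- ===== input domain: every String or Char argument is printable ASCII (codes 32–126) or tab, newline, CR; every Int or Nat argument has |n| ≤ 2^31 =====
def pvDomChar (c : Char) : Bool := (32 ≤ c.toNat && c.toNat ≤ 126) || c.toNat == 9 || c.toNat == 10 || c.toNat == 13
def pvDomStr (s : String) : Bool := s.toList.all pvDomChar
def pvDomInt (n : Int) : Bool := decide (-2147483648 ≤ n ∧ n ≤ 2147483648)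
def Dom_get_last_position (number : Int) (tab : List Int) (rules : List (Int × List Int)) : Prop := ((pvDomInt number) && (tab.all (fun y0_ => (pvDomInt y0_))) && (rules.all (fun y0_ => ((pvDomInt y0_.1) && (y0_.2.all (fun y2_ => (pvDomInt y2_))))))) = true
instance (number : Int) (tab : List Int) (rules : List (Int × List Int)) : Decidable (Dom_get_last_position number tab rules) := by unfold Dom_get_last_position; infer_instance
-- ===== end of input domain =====

-- B replaces A's forward overwrite-the-accumulator scan by a backward first-match-and-return scan (simpler).

-- ===== PORT A =====
def get_last_position (number : Int) (tab : List Int) (rules : List (Int × List Int)) : Int :=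
  if (PySem.Dict.get? (PySem.Dict.mk rules) number).isNone then (tab.length : Int) - 1
  else
    tab.foldl (fun last_index cur =>
      match PySem.Dict.get? (PySem.Dict.mk rules) cur with
      | none => last_index                    -- 'continue'
      | some vs =>
        if number ∈ vs then (((PySem.List.index? tab cur).getD 0 : Nat) : Int)   -- cur ∈ tab, so index? is some
        else last_index) (-1)

-- ===== PORT B =====
-- backward scan: first cur (from the right) with cur in rules and number in rules[cur]
def glpScan (number : Int) (tab : List Int) (rules : List (Int × List Int)) : List Int → Int
  | [] => -1
  | cur :: rest =>
    match PySem.Dict.get? (PySem.Dict.mk rules) cur with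
    | some vs =>
      if number ∈ vs then (((PySem.List.index? tab cur).getD 0 : Nat) : Int)
      else glpScan number tab rules rest
    | none => glpScan number tab rules rest

def get_last_position_alt (number : Int) (tab : List Int) (rules : List (Int × List Int)) : Int :=
  if (PySem.Dict.get? (PySem.Dict.mk rules) number).isNone then (tab.length : Int) - 1
  else glpScan number tab rules tab.reverse

-- ===== PRECONDITION & SPEC =====
def Spec_get_last_position (number : Int) (tab : List Int) (rules : List (Int × List Int)) (out : Int) : Prop := out = get_last_position_alt number tab rules
instance (number : Int) (tab : List Int) (rules : List (Int × List Int)) (out : Int) : Decidable (Spec_get_last_position number tab rules out) := by unfold Spec_get_last_position; infer_instance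

-- ===== CLAIM (what is proved, stated in full; the proofs are below) =====
def Claim_equal_get_last_position : Prop := ∀ (number : Int) (tab : List Int) (rules : List (Int × List Int)), Dom_get_last_position number tab rules → Spec_get_last_position number tab rules (get_last_position number tab rules)

-- ===== LEMMAS AND PROOFS =====

-- first (from the left) matching element's index, as an Option
def glpFind (number : Int) (tab : List Int) (rules : List (Int × List Int)) : List Int → Option Int
  | [] => none
  | cur :: rest =>
    match PySem.Dict.get? (PySem.Dict.mk rules) cur with
    | some vs =>
      if number ∈ vs then some (((PySem.List.index? tab cur).getD 0 : Nat) : Int)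
      else glpFind number tab rules rest
    | none => glpFind number tab rules rest

theorem glpScan_eq_find (number : Int) (tab : List Int) (rules : List (Int × List Int)) :
    ∀ m, glpScan number tab rules m = (glpFind number tab rules m).getD (-1) := by
  intro m
  induction m with
  | nil => rfl
  | cons c r ih =>
    simp only [glpScan, glpFind]
    cases h : PySem.Dict.get? (PySem.Dict.mk rules) c with
    | none => exact ih
    | some vs =>
      by_cases hm : number ∈ vs
      · simp [hm]
      · simp [hm, ih]

theorem foldl_eq_find (number : Int) (tab : List Int) (rules : List (Int × List Int)) :
    ∀ (m : List Int) (acc : Int),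
      List.foldl (fun last_index cur =>
        match PySem.Dict.get? (PySem.Dict.mk rules) cur with
        | none => last_index
        | some vs =>
          if number ∈ vs then (((PySem.List.index? tab cur).getD 0 : Nat) : Int)
          else last_index) acc m.reverse
      = (glpFind number tab rules m).getD acc := by
  intro m
  induction m with
  | nil => intro acc; rfl
  | cons c r ih =>
    intro acc
    simp only [List.reverse_cons, List.foldl_append, List.foldl_cons, List.foldl_nil, ih, glpFind]
    cases h : PySem.Dict.get? (PySem.Dict.mk rules) c with
    | none => rfl
    | some vs =>
      by_cases hm : number ∈ vs
      · simp [hm]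
      · simp [hm]

-- ===== VERDICT (by name: the statement is the Claim_ definition above) =====
theorem get_last_position_spec : Claim_equal_get_last_position := by
  intro number tab rules _
  unfold Spec_get_last_position get_last_position get_last_position_alt
  by_cases h : (PySem.Dict.get? (PySem.Dict.mk rules) number).isNone
  · simp [h]
  · simp only [h, Bool.false_eq_true, if_false]
    rw [glpScan_eq_find]
    have := foldl_eq_find number tab rules tab.reverse (-1)
    rw [List.reverse_reverse] at this
    exact this
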